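-- pv_equiv track=rewrite | github.com/pololee/oj-leetcode | problems/TwoMoreOnes.py | has_two_more_ones
-- ===== SOURCE A (Python) =====
-- def has_two_more_ones(array):
--     if not array or not array[0]:
--         return False
--
--     m = len(array)
--     n = len(array[0])
--     for i in range(m):
--         if sum(array[i]) >= 2:
--             return True
--
--     for j in range(n):
--         col = [array[i][j] for i in range(m)]
--         if sum(col) >= 2:
--             return True
-- ===== SOURCE B (Python) =====
-- def has_two_more_ones(array):
--     if not array or not array[0]:
--         return False
--     n = len(array[0])
--     col = [0] * n
--     for row in array:
--         s = 0
--         for j, v in enumerate(row):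
--             s += v
--             if s >= 2:
--                 return True
--             if j < n:
--                 col[j] += v
--     return any(c >= 2 for c in col)
-- ===== Notes on version B (the rewrite author's own statement) =====
-- stated objective: alternative
-- what changed: B makes a single fused pass keeping a running row prefix sum and a column-counter array (returning as soon as any monitored count reaches 2), instead of A's two separate phases (full row scan, then building each column as a list and summing it).
-- outside the precondition, e.g. on has_two_more_ones([[0]]): A returns None, B returns False
-- crash fix: On ragged inputs with no row summing to 2 or more and every fully-populated column (before the shortest row's end) summing below 2, A raises IndexError in its column phase while B returns False. — e.g. on has_two_more_ones([[0, 0], [0]]): A raises IndexError, B returns false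
import Mathlib
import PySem

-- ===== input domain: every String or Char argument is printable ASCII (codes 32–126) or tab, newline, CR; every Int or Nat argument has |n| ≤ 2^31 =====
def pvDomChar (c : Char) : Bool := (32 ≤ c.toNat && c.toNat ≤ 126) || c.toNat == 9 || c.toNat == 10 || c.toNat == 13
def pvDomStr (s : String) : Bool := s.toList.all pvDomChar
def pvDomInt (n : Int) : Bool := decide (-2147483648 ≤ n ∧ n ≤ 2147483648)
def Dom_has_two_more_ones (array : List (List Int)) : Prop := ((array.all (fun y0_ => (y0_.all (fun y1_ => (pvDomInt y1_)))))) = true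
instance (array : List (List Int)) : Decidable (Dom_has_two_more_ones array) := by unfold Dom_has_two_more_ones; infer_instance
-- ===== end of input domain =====

-- B: one fused pass with a running row prefix sum and a column-counter array,
-- instead of A's two separate phases; equivalent on Pre_ (where A returns a bool).


-- ===== PORT A =====
-- Transliteration of A. `array[i]`/`array[i][j]` are ported with getD: inside
-- Pre_ every access A performs is in range (out-of-range accesses = IndexError
-- are excluded by Pre_), and A's final fall-through (Python returns None there,
-- excluded by Pre_) is written `false`.
def has_two_more_ones (array : List (List Int)) : Bool :=
  if array = [] ∨ array.headD [] = [] then false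
  else
    -- m = len(array), n = len(array[0]), inlined
    if (List.range array.length).any (fun i => decide (2 ≤ (array.getD i []).sum)) then true
    else if (List.range (array.headD []).length).any (fun j =>
        decide (2 ≤ ((List.range array.length).map
          (fun i => (array.getD i []).getD j 0)).sum)) then true
    else false

-- ===== PORT B =====
-- inner loop: `for j, v in enumerate(row): s += v; if s >= 2: return True; if j < n: col[j] += v`
-- `none` encodes the early `return True`.
def bRowLoop (n : Nat) : List Int → Nat → Int → List Int → Option (List Int)
  | [], _, _, col => some col
  | v :: rest, j, s, col =>
    let s' := s + v
    if 2 ≤ s' then none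
    else bRowLoop n rest (j + 1) s' (if j < n then col.set j (col.getD j 0 + v) else col)

-- outer loop: `for row in array: …`
def bRowsLoop (n : Nat) : List (List Int) → List Int → Option (List Int)
  | [], col => some col
  | row :: rows, col =>
    match bRowLoop n row 0 0 col with
    | none => none
    | some col' => bRowsLoop n rows col'

def has_two_more_ones_alt (array : List (List Int)) : Bool :=
  if array = [] ∨ array.headD [] = [] then false
  else
    -- n = len(array[0]), inlined
    match bRowsLoop (array.headD []).length array
        (List.replicate (array.headD []).length 0) with
    | none => true
    | some col => col.any (fun c => decide (2 ≤ c))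

-- ===== PRECONDITION & SPEC =====
-- Pre_ excludes exactly the inputs on which A does not return a bool: ragged
-- inputs where A's column phase raises IndexError, and inputs where A falls
-- through both loops and returns None instead of False.
def Pre_has_two_more_ones (array : List (List Int)) : Prop :=
  array = [] ∨ array.headD [] = [] ∨
  (∃ row ∈ array, 2 ≤ row.sum) ∨
  (∃ j < (array.headD []).length, (∀ row ∈ array, j < row.length) ∧
     2 ≤ (array.map (fun r => r.getD j 0)).sum)
instance (array : List (List Int)) : Decidable (Pre_has_two_more_ones array) := by
  unfold Pre_has_two_more_ones; infer_instance

def pvWitness_has_two_more_ones : List (List Int) := [[1, 1], [0, 0]]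

-- On ragged inputs with no row summing to 2 or more and every fully-populated
-- column (before the shortest row's end) summing below 2, A raises IndexError
-- in its column phase while B returns False.
def Raises_has_two_more_ones (array : List (List Int)) : Prop :=
  array ≠ [] ∧ array.headD [] ≠ [] ∧
  (∀ row ∈ array, row.sum < 2) ∧
  (∃ row ∈ array, row.length < (array.headD []).length) ∧
  (∀ j < (array.headD []).length, (∀ row ∈ array, j < row.length) →
     (array.map (fun r => r.getD j 0)).sum < 2)
instance (array : List (List Int)) : Decidable (Raises_has_two_more_ones array) := by
  unfold Raises_has_two_more_ones; infer_instance

def pvRaiseWitness_has_two_more_ones : List (List Int) := [[0, 0], [0]]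
def pvRaiseWitnessOut_has_two_more_ones : Bool := false

def Spec_has_two_more_ones (array : List (List Int)) (out : Bool) : Prop := out = has_two_more_ones_alt array
instance (array : List (List Int)) (out : Bool) : Decidable (Spec_has_two_more_ones array out) := by unfold Spec_has_two_more_ones; infer_instance

-- ===== CLAIM (what is proved, stated in full; the proofs are below) =====
def Claim_equal_has_two_more_ones : Prop := ∀ (array : List (List Int)), Dom_has_two_more_ones array → Pre_has_two_more_ones array → Spec_has_two_more_ones array (has_two_more_ones array)
def Claim_raises_has_two_more_ones : Prop := (∀ (array : List (List Int)), Dom_has_two_more_ones array → Raises_has_two_more_ones array → ¬ Pre_has_two_more_ones array) ∧ (Dom_has_two_more_ones (pvRaiseWitness_has_two_more_ones) ∧ Raises_has_two_more_ones (pvRaiseWitness_has_two_more_ones) ∧ has_two_more_ones_alt (pvRaiseWitness_has_two_more_ones) = pvRaiseWitnessOut_has_two_more_ones)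

-- ===== LEMMAS AND PROOFS =====

-- A's column comprehension `[array[i][j] for i in range(m)]` equals a map over the rows.
theorem mapRange_getD {α β : Type} (xs : List α) (d : α) (f : α → β) :
    (List.range xs.length).map (fun i => f (xs.getD i d)) = xs.map f := by
  apply List.ext_getElem
  · simp
  · intro i h1 h2
    have h1' : i < xs.length := by simpa using h1
    simp [List.getElem?_eq_getElem h1']

-- If the whole remaining row sums (with the running prefix) to ≥ 2, the inner loop early-returns.
theorem bRowLoop_none (n : Nat) :
    ∀ (v : Int) (rest : List Int) (j : Nat) (s : Int) (col : List Int),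
      2 ≤ s + v + rest.sum → bRowLoop n (v :: rest) j s col = none := by
  intro v rest
  induction rest generalizing v with
  | nil =>
    intro j s col h
    have h2 : 2 ≤ s + v := by simpa using h
    simp [bRowLoop, h2]
  | cons w rest ih =>
    intro j s col h
    by_cases h2 : 2 ≤ s + v
    · simp [bRowLoop, h2]
    · simp only [bRowLoop, if_neg h2]
      apply ih
      simp only [List.sum_cons] at h ⊢
      linarith

theorem bRowsLoop_none (n : Nat) :
    ∀ (rows : List (List Int)) (col : List Int) (row : List Int),
      row ∈ rows → 2 ≤ row.sum → bRowsLoop n rows col = none := by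
  intro rows
  induction rows with
  | nil => intro col row h; simp at h
  | cons r rs ih =>
    intro col row hmem hsum
    rcases List.mem_cons.mp hmem with h | h
    · subst h
      cases row with
      | nil => simp at hsum
      | cons v rest =>
        have := bRowLoop_none n v rest 0 0 col (by simpa using hsum)
        simp [bRowsLoop, this]
    · cases hr : bRowLoop n r 0 0 col with
      | none => simp [bRowsLoop, hr]
      | some col' =>
        simp only [bRowsLoop, hr]
        exact ih col' row h hsum

-- The inner loop (when it does not early-return) adds row[j - jj] to col[j] for each
-- in-range monitored column, and preserves the length.
theorem bRowLoop_some (n : Nat) :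
    ∀ (row : List Int) (jj : Nat) (s : Int) (col col' : List Int),
      bRowLoop n row jj s col = some col' → col.length = n →
      col'.length = n ∧ ∀ j, j < n →
        col'.getD j 0 = col.getD j 0 +
          (if jj ≤ j ∧ j - jj < row.length then row.getD (j - jj) 0 else 0) := by
  intro row
  induction row with
  | nil =>
    intro jj s col col' h hlen
    simp only [bRowLoop, Option.some.injEq] at h
    subst h
    exact ⟨hlen, fun j hj => by simp⟩
  | cons v rest ih =>
    intro jj s col col' h hlen
    by_cases h2 : 2 ≤ s + v
    · simp [bRowLoop, h2] at h
    · simp only [bRowLoop, if_neg h2] at h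
      by_cases hjn : jj < n
      · rw [if_pos hjn] at h
        have hlen1 : (col.set jj (col.getD jj 0 + v)).length = n := by simp [hlen]
        obtain ⟨hl, hv⟩ := ih (jj + 1) (s + v) _ col' h hlen1
        refine ⟨hl, fun j hj => ?_⟩
        rw [hv j hj]
        by_cases hje : j = jj
        · subst hje
          rw [if_neg (show ¬ (j + 1 ≤ j ∧ j - (j + 1) < rest.length) by omega), add_zero]
          have hjc : j < col.length := by omega
          have e2 : (col.set j (col.getD j 0 + v)).getD j 0 = col.getD j 0 + v := by
            rw [List.getD_eq_getElem _ 0 (by simpa using hjc)]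
            rw [List.getElem_set]
            simp
          rw [e2, if_pos (show j ≤ j ∧ j - j < (v :: rest).length by
            simp only [List.length_cons]; omega)]
          simp
        · have e2 : (col.set jj (col.getD jj 0 + v)).getD j 0 = col.getD j 0 := by
            by_cases hjc : j < col.length
            · rw [List.getD_eq_getElem _ 0 (by simpa using hjc),
                List.getD_eq_getElem _ 0 hjc, List.getElem_set]
              rw [if_neg (by omega)]
            · rw [List.getD_eq_default _ 0 (by simp; omega),
                List.getD_eq_default _ 0 (by omega)]
          rw [e2]
          congr 1
          by_cases hc1 : jj + 1 ≤ j ∧ j - (jj + 1) < rest.length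
          · rw [if_pos hc1, if_pos (show jj ≤ j ∧ j - jj < (v :: rest).length by
              simp only [List.length_cons]; omega)]
            rw [show j - jj = (j - (jj + 1)) + 1 by omega]
            simp
          · rw [if_neg hc1, if_neg (show ¬ (jj ≤ j ∧ j - jj < (v :: rest).length) by
              simp only [List.length_cons]; omega)]
      · rw [if_neg hjn] at h
        obtain ⟨hl, hv⟩ := ih (jj + 1) (s + v) _ col' h hlen
        refine ⟨hl, fun j hj => ?_⟩
        rw [hv j hj]
        rw [if_neg (show ¬ (jj + 1 ≤ j ∧ j - (jj + 1) < rest.length) by omega),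
          if_neg (show ¬ (jj ≤ j ∧ j - jj < (v :: rest).length) by
            simp only [List.length_cons]; omega)]

-- If the outer loop finishes, col[j] has accumulated column j of the processed rows.
theorem bRowsLoop_some (n : Nat) (j : Nat) (hj : j < n) :
    ∀ (rows : List (List Int)) (col col' : List Int),
      bRowsLoop n rows col = some col' → col.length = n →
      (∀ row ∈ rows, j < row.length) →
      col'.length = n ∧
        col'.getD j 0 = col.getD j 0 + (rows.map (fun r => r.getD j 0)).sum := by
  intro rows
  induction rows with
  | nil =>
    intro col col' h hlen _
    simp only [bRowsLoop, Option.some.injEq] at h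
    subst h
    simp [hlen]
  | cons r rs ih =>
    intro col col' h hlen hlong
    cases hr : bRowLoop n r 0 0 col with
    | none => simp [bRowsLoop, hr] at h
    | some col1 =>
      simp only [bRowsLoop, hr] at h
      obtain ⟨hl1, hv1⟩ := bRowLoop_some n r 0 0 col col1 hr hlen
      obtain ⟨hl2, hv2⟩ := ih col1 col' h hl1 (fun row hm => hlong row (List.mem_cons_of_mem _ hm))
      refine ⟨hl2, ?_⟩
      rw [hv2, hv1 j hj]
      have hrj : j < r.length := hlong r List.mem_cons_self
      rw [if_pos ⟨Nat.zero_le j, by simpa using hrj⟩]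
      simp only [Nat.sub_zero, List.map_cons, List.sum_cons]
      ring

-- B's post-guard body returns true whenever some monitored column sums to ≥ 2.
theorem alt_core (n j : Nat) (hj : j < n) (rows : List (List Int))
    (hlong : ∀ row ∈ rows, j < row.length)
    (hsum : 2 ≤ (rows.map (fun r => r.getD j 0)).sum) :
    (match bRowsLoop n rows (List.replicate n 0) with
      | none => true
      | some col => col.any (fun c => decide (2 ≤ c))) = true := by
  cases h : bRowsLoop n rows (List.replicate n 0) with
  | none => simp
  | some col' =>
    obtain ⟨hl, hv⟩ := bRowsLoop_some n j hj rows _ col' h (by simp) hlong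
    simp only []
    rw [List.any_eq_true]
    have hjl : j < col'.length := by omega
    refine ⟨col'[j], List.getElem_mem hjl, ?_⟩
    rw [List.getD_eq_getElem _ 0 hjl] at hv
    have hz : (List.replicate n (0 : Int)).getD j 0 = 0 := by
      rw [List.getD_eq_getElem _ 0 (by simpa using hj)]
      simp
    rw [hz, zero_add] at hv
    simp only [decide_eq_true_eq]
    omega

-- B returns true whenever some row sums to ≥ 2.
theorem alt_true_of_row (array : List (List Int)) (row : List Int)
    (hmem : row ∈ array) (hsum : 2 ≤ row.sum)
    (hg : ¬ (array = [] ∨ array.headD [] = [])) :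
    has_two_more_ones_alt array = true := by
  unfold has_two_more_ones_alt
  rw [if_neg hg]
  rw [bRowsLoop_none _ array _ row hmem hsum]

-- B returns true whenever some fully-populated column sums to ≥ 2.
theorem alt_true_of_col (array : List (List Int)) (j : Nat)
    (hj : j < (array.headD []).length)
    (hlong : ∀ row ∈ array, j < row.length)
    (hsum : 2 ≤ (array.map (fun r => r.getD j 0)).sum)
    (hg : ¬ (array = [] ∨ array.headD [] = [])) :
    has_two_more_ones_alt array = true := by
  unfold has_two_more_ones_alt
  rw [if_neg hg]
  exact alt_core _ j hj array hlong hsum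

-- A returns true whenever some row sums to ≥ 2.
theorem a_true_of_row (array : List (List Int)) (row : List Int)
    (hmem : row ∈ array) (hsum : 2 ≤ row.sum)
    (hg : ¬ (array = [] ∨ array.headD [] = [])) :
    has_two_more_ones array = true := by
  unfold has_two_more_ones
  rw [if_neg hg]
  obtain ⟨i, hi, rfl⟩ := List.getElem_of_mem hmem
  have hrow : (List.range array.length).any
      (fun i => decide (2 ≤ (array.getD i []).sum)) = true := by
    rw [List.any_eq_true]
    exact ⟨i, by simp [hi], by rw [List.getD_eq_getElem _ [] hi]; simpa using hsum⟩
  rw [hrow]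
  simp

-- A returns true whenever some fully-populated column sums to ≥ 2.
theorem a_true_of_col (array : List (List Int)) (j : Nat)
    (hj : j < (array.headD []).length)
    (hsum : 2 ≤ (array.map (fun r => r.getD j 0)).sum)
    (hg : ¬ (array = [] ∨ array.headD [] = [])) :
    has_two_more_ones array = true := by
  unfold has_two_more_ones
  rw [if_neg hg]
  by_cases hrow : (List.range array.length).any
      (fun i => decide (2 ≤ (array.getD i []).sum)) = true
  · rw [hrow]; simp
  · simp only [Bool.not_eq_true] at hrow
    rw [hrow]
    have hcol : (List.range (array.headD []).length).any (fun j =>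
        decide (2 ≤ ((List.range array.length).map
          (fun i => (array.getD i []).getD j 0)).sum)) = true := by
      rw [List.any_eq_true]
      refine ⟨j, by simp only [List.mem_range]; exact hj, ?_⟩
      rw [mapRange_getD array [] (fun r => r.getD j 0)]
      simpa using hsum
    rw [hcol]
    simp

-- ===== VERDICT (by name: the statement is the Claim_ definition above) =====
theorem has_two_more_ones_spec : Claim_equal_has_two_more_ones := by
  intro array _ hpre
  unfold Spec_has_two_more_ones
  by_cases hg : array = [] ∨ array.headD [] = []
  · unfold has_two_more_ones has_two_more_ones_alt
    rw [if_pos hg, if_pos hg]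
  · rcases hpre with h | h | ⟨row, hmem, hsum⟩ | ⟨j, hj, hlong, hsum⟩
    · exact absurd (Or.inl h) hg
    · exact absurd (Or.inr h) hg
    · rw [a_true_of_row array row hmem hsum hg, alt_true_of_row array row hmem hsum hg]
    · rw [a_true_of_col array j hj hsum hg, alt_true_of_col array j hj hlong hsum hg]

def has_two_more_ones_raises : Claim_raises_has_two_more_ones := by
  unfold Claim_raises_has_two_more_ones
  refine ⟨?_, by decide⟩
  intro array _ hr hpre
  obtain ⟨hne, hhd, hlt, ⟨row, hmem, hshort⟩, hcols⟩ := hr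
  rcases hpre with h | h | ⟨r, hm, hs⟩ | ⟨j, hj, hlong, hs⟩
  · exact hne h
  · exact hhd h
  · exact absurd hs (by simpa using hlt r hm)
  · exact absurd hs (by simpa using hcols j hj hlong)
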